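-- pv_equiv track=rewrite | github.com/vhsw/Advent-of-Code | 2016/Day 14/one_time_pad.py | has_five_in_row
-- ===== SOURCE A (Python) =====
-- def has_five_in_row(digest: str, match: str):
--     counter = 0
--     for char in digest:
--         if char != match:
--             counter = 0
--             continue
--         counter += 1
--         if counter >= 5:
--             return True
--     return False
-- ===== SOURCE B (Python) =====
-- from itertools import groupby
--
--
-- def has_five_in_row(digest: str, match: str):
--     return any(c == match and sum(1 for _ in g) >= 5 for c, g in groupby(digest))
-- ===== Notes on version B (the rewrite author's own statement) =====
-- stated objective: idiomatic
-- what changed: Replaced the rolling counter with early return by itertools.groupby run-segmentation: any maximal run whose key equals match and whose length is at least 5.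
import Mathlib
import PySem

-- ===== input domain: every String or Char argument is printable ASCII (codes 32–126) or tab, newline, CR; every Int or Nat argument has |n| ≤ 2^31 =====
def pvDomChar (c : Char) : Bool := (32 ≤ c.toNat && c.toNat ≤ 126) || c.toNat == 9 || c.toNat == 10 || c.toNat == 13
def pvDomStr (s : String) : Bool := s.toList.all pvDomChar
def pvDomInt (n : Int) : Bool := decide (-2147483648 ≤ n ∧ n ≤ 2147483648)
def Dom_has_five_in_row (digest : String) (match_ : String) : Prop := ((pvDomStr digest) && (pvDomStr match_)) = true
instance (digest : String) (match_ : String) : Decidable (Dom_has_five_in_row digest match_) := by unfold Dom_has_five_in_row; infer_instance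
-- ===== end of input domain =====

-- B replaces A's rolling counter with a groupby-style run segmentation; a more idiomatic decomposition, same O(n) cost.

-- ===== PORT A =====
-- A's for-loop over the characters with mutable `counter` and early `return True`;
-- iterating a Python string yields 1-character strings, hence `String.ofList [c]`.
def pvLoopA (m : String) : List Char → Nat → Bool
  | [], _ => false
  | c :: rest, counter =>
    if String.ofList [c] ≠ m then pvLoopA m rest 0
    else if counter + 1 ≥ 5 then true
    else pvLoopA m rest (counter + 1)

def has_five_in_row (digest : String) (match_ : String) : Bool :=
  pvLoopA match_ digest.toList 0

-- ===== PORT B =====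
-- itertools.groupby: split into maximal runs, keep (key, run length).
def pvRuns : List Char → List (Char × Nat)
  | [] => []
  | c :: rest =>
    match pvRuns rest with
    | (d, n) :: t => if c = d then (c, n + 1) :: t else (c, 1) :: (d, n) :: t
    | [] => [(c, 1)]

def has_five_in_row_alt (digest : String) (match_ : String) : Bool :=
  (pvRuns digest.toList).any (fun p => decide (String.ofList [p.1] = match_) && decide (5 ≤ p.2))

-- ===== PRECONDITION & SPEC =====
def Spec_has_five_in_row (digest : String) (match_ : String) (out : Bool) : Prop := out = has_five_in_row_alt digest match_
instance (digest : String) (match_ : String) (out : Bool) : Decidable (Spec_has_five_in_row digest match_ out) := by unfold Spec_has_five_in_row; infer_instance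

-- ===== CLAIM (what is proved, stated in full; the proofs are below) =====
def Claim_equal_has_five_in_row : Prop := ∀ (digest : String) (match_ : String), Dom_has_five_in_row digest match_ → Spec_has_five_in_row digest match_ (has_five_in_row digest match_)

-- ===== LEMMAS AND PROOFS =====

-- A's loop read off the run decomposition, with the pending counter k folded into the head run.
def pvF (m : String) : List (Char × Nat) → Nat → Bool
  | [], _ => false
  | (c, n) :: t, k => if String.ofList [c] = m then (decide (5 ≤ k + n) || pvF m t 0) else pvF m t 0

theorem pvMk_inj {c d : Char} (h : String.ofList [c] = String.ofList [d]) : c = d := by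
  have := congrArg String.toList h
  simpa using this

theorem pvLoopA_eq_pvF (m : String) (l : List Char) :
    ∀ k, pvLoopA m l k = pvF m (pvRuns l) k := by
  induction l with
  | nil => intro k; simp [pvLoopA, pvRuns, pvF]
  | cons c rest ih =>
    intro k
    by_cases hm : String.ofList [c] = m
    · -- matching head character
      rcases hr : pvRuns rest with _ | ⟨⟨d, n⟩, t⟩
      · by_cases h5 : 5 ≤ k + 1
        · simp [pvLoopA, pvRuns, hr, pvF, hm, h5]
        · simp [pvLoopA, pvRuns, hr, pvF, hm, h5, ih]
      · by_cases hcd : c = d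
        · subst hcd
          by_cases h5 : 5 ≤ k + 1
          · have h5n : 5 ≤ k + (n + 1) := by omega
            simp [pvLoopA, pvRuns, hr, pvF, hm, h5, h5n]
          · have hiff : 5 ≤ k + 1 + n ↔ 5 ≤ k + (n + 1) := by omega
            simp [pvLoopA, pvRuns, hr, pvF, hm, h5, ih, hiff]
        · -- head of rest's runs is a different character; it cannot match m
          have hdm : ¬ String.ofList [d] = m := fun h => hcd (pvMk_inj (hm.trans h.symm))
          by_cases h5 : 5 ≤ k + 1
          · simp [pvLoopA, pvRuns, hr, pvF, hm, hcd, hdm, h5]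
          · simp [pvLoopA, pvRuns, hr, pvF, hm, hcd, hdm, h5, ih]
    · -- non-matching head: counter resets, and the head run never matches
      rcases hr : pvRuns rest with _ | ⟨⟨d, n⟩, t⟩
      · simp [pvLoopA, pvRuns, hr, pvF, hm, ih]
      · by_cases hcd : c = d
        · subst hcd
          simp [pvLoopA, pvRuns, hr, pvF, hm, ih]
        · simp [pvLoopA, pvRuns, hr, pvF, hm, hcd, ih]

theorem pvF_zero_eq_any (m : String) (rs : List (Char × Nat)) :
    pvF m rs 0 = rs.any (fun p => decide (String.ofList [p.1] = m) && decide (5 ≤ p.2)) := by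
  induction rs with
  | nil => simp [pvF]
  | cons p t ih =>
    obtain ⟨c, n⟩ := p
    by_cases hm : String.ofList [c] = m <;> simp [pvF, hm, ih]

-- ===== VERDICT (by name: the statement is the Claim_ definition above) =====
theorem has_five_in_row_spec : Claim_equal_has_five_in_row := by
  intro digest match_ _
  unfold Spec_has_five_in_row has_five_in_row has_five_in_row_alt
  rw [pvLoopA_eq_pvF, pvF_zero_eq_any]
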